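-- pv_equiv track=rewrite | github.com/nsgxi43/Reta-AI | services/constraint_engine.py | _apply_size_preference
-- ===== SOURCE A (Python) =====
-- def _apply_size_preference(products, preferred_size):
--     if not preferred_size:
--         return products
--
--     preferred = []
--     others = []
--
--     for p in products:
--         size = p.get("size_variant", "")
--         if preferred_size.lower() in size.lower():
--             preferred.append(p)
--         else:
--             others.append(p)
--
--     return preferred + others
-- ===== SOURCE B (Python) =====
-- def _apply_size_preference(products, preferred_size):
--     if not preferred_size:
--         return products
--     needle = preferred_size.lower()
--     return sorted(
--         products,
--         key=lambda p: 0 if needle in p.get("size_variant", "").lower() else 1,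
--     )
-- ===== Notes on version B (the rewrite author's own statement) =====
-- stated objective: simpler
-- what changed: Replaces the two-accumulator partition-and-concatenate loop with a single stable sort on a 0/1 match key (stability preserves relative order within each group).
import Mathlib
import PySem

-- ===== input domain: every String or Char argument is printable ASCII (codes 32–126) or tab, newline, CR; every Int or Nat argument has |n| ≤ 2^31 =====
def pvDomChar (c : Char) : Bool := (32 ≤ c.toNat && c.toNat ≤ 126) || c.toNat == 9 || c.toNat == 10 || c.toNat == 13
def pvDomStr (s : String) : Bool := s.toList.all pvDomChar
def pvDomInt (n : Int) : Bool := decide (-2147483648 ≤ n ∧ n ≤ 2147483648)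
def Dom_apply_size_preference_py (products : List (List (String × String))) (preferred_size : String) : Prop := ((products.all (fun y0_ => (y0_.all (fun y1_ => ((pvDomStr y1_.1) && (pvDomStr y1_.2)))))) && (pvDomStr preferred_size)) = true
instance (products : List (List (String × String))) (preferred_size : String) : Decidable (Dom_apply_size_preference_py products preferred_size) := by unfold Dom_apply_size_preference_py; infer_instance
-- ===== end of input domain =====

-- B replaces A's two-accumulator partition with one stable sort on a 0/1 match key (objective: simpler).

-- ===== PORT A =====
def apply_size_preference_py (products : List (List (String × String))) (preferred_size : String) : List (List (String × String)) :=
  if preferred_size = "" then products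
  else
    let r := products.foldl
      (fun (acc : List (List (String × String)) × List (List (String × String))) p =>
        let size := PySem.Dict.getD (PySem.Dict.mk p) "size_variant" ""
        if PySem.Str.isIn (PySem.Str.lower preferred_size) (PySem.Str.lower size)
        then (acc.1 ++ [p], acc.2)
        else (acc.1, acc.2 ++ [p]))
      ([], [])
    r.1 ++ r.2

-- ===== PORT B =====
def apply_size_preference_py_alt (products : List (List (String × String))) (preferred_size : String) : List (List (String × String)) :=
  if preferred_size = "" then products
  else
    let needle := PySem.Str.lower preferred_size
    PySem.List.sorted products
      (fun p => if PySem.Str.isIn needle (PySem.Str.lower (PySem.Dict.getD (PySem.Dict.mk p) "size_variant" "")) then (0 : Int) else 1)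
      false

-- ===== PRECONDITION & SPEC =====
def Spec_apply_size_preference_py (products : List (List (String × String))) (preferred_size : String) (out : List (List (String × String))) : Prop := out = apply_size_preference_py_alt products preferred_size
instance (products : List (List (String × String))) (preferred_size : String) (out : List (List (String × String))) : Decidable (Spec_apply_size_preference_py products preferred_size out) := by unfold Spec_apply_size_preference_py; infer_instance

-- ===== CLAIM (what is proved, stated in full; the proofs are below) =====
def Claim_equal_apply_size_preference_py : Prop := ∀ (products : List (List (String × String))) (preferred_size : String), Dom_apply_size_preference_py products preferred_size → Spec_apply_size_preference_py products preferred_size (apply_size_preference_py products preferred_size)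

-- ===== LEMMAS AND PROOFS =====

-- insertBy with a 'before' that is false against every element appends at the end
theorem insertBy_all_false {α : Type} (before : α → α → Bool) (x : α) (ys : List α)
    (h : ∀ y ∈ ys, before x y = false) :
    PySem.List.insertBy before x ys = ys ++ [x] := by
  induction ys with
  | nil => rfl
  | cons y ys ih =>
    simp only [PySem.List.insertBy, h y (List.mem_cons_self), Bool.false_eq_true, if_false,
      List.cons_append]
    exact congrArg (y :: ·) (ih (fun y hy => h y (List.mem_cons_of_mem _ hy)))

-- insertBy lands exactly between a false-prefix and a true-suffix
theorem insertBy_split {α : Type} (before : α → α → Bool) (x : α) (pref oth : List α)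
    (hpref : ∀ a ∈ pref, before x a = false)
    (hoth : ∀ a ∈ oth, before x a = true) :
    PySem.List.insertBy before x (pref ++ oth) = pref ++ x :: oth := by
  induction pref with
  | nil =>
    cases oth with
    | nil => rfl
    | cons o os =>
      simp only [List.nil_append, PySem.List.insertBy, hoth o (List.mem_cons_self), if_true]
  | cons a as ih =>
    simp only [List.cons_append, PySem.List.insertBy, hpref a (List.mem_cons_self),
      Bool.false_eq_true, if_false]
    exact congrArg (a :: ·) (ih (fun a ha => hpref a (List.mem_cons_of_mem _ ha)))

-- the insertion-sort fold with a 0/1 key is the stable partition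
theorem foldl_insertBy_binary {α : Type} (p : α → Bool) (xs pref oth : List α)
    (hpref : ∀ a ∈ pref, p a = true) (hoth : ∀ a ∈ oth, p a = false) :
    xs.foldl (fun acc x =>
        PySem.List.insertBy
          (fun a b => decide ((if p a then (0 : Int) else 1) < (if p b then (0 : Int) else 1)))
          x acc) (pref ++ oth)
      = (pref ++ xs.filter p) ++ (oth ++ xs.filter (fun x => !p x)) := by
  induction xs generalizing pref oth with
  | nil => simp
  | cons x xs ih =>
    simp only [List.foldl_cons]
    by_cases hx : p x = true
    · rw [insertBy_split _ x pref oth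
        (fun a ha => by simp [hpref a ha, hx])
        (fun a ha => by simp [hoth a ha, hx])]
      rw [show pref ++ x :: oth = (pref ++ [x]) ++ oth by simp]
      rw [ih (pref ++ [x]) oth
        (fun a ha => by rcases List.mem_append.mp ha with h | h
                        · exact hpref a h
                        · simp at h; subst h; exact hx) hoth]
      simp [hx]
    · rw [insertBy_all_false _ x (pref ++ oth)
        (fun a ha => by
          rcases List.mem_append.mp ha with h | h
          · simp [hpref a h, hx]
          · simp [hoth a h, Bool.eq_false_iff.mpr hx])]
      rw [show (pref ++ oth) ++ [x] = pref ++ (oth ++ [x]) by simp]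
      rw [ih pref (oth ++ [x]) hpref
        (fun a ha => by rcases List.mem_append.mp ha with h | h
                        · exact hoth a h
                        · simp at h; subst h; exact Bool.eq_false_iff.mpr hx)]
      simp [hx]

theorem sorted_binary_key {α : Type} (p : α → Bool) (xs : List α) :
    PySem.List.sorted xs (fun x => if p x then (0 : Int) else 1) false
      = xs.filter p ++ xs.filter (fun x => !p x) := by
  rw [PySem.List.sorted_eq_foldl_insertBy]
  simpa using foldl_insertBy_binary p xs [] [] (by simp) (by simp)

-- A's pair-accumulator loop computes the two filters
theorem foldl_pair_filter {α : Type} (p : α → Bool) (xs : List α) (acc : List α × List α) :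
    xs.foldl (fun acc x => if p x then (acc.1 ++ [x], acc.2) else (acc.1, acc.2 ++ [x])) acc
      = (acc.1 ++ xs.filter p, acc.2 ++ xs.filter (fun x => !p x)) := by
  induction xs generalizing acc with
  | nil => simp
  | cons x xs ih =>
    by_cases hx : p x = true
    · simp [List.foldl_cons, hx, ih]
    · simp [List.foldl_cons, hx, ih]

-- ===== VERDICT (by name: the statement is the Claim_ definition above) =====
theorem apply_size_preference_py_spec : Claim_equal_apply_size_preference_py := by
  intro products preferred_size _
  unfold Spec_apply_size_preference_py apply_size_preference_py apply_size_preference_py_alt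
  by_cases h : preferred_size = ""
  · simp [h]
  · simp only [h, if_false]
    rw [sorted_binary_key
      (fun p => PySem.Str.isIn (PySem.Str.lower preferred_size)
        (PySem.Str.lower (PySem.Dict.getD (PySem.Dict.mk p) "size_variant" ""))) products]
    rw [foldl_pair_filter]
    simp
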